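-- pv_equiv track=rewrite | github.com/dvdblk/leetcode | problems/0999-available-captures-for-rook/solution.py | numRookCaptures
-- ===== SOURCE A (Python) =====
-- from typing import List
--
-- def numRookCaptures(board: List[List[str]]) -> int:
--     for x in range(len(board)):
--         for y in range(len(board[x])):
--             if board[x][y] == "R":
--                 # find rook first
--                 rook = x, y
--                 # check all directions from here
--                 captures = 0
--                 # south
--                 for i in range(x, len(board)):
--                     if board[i][y] == "p":
--                         captures += 1
--                         break
--                     elif board[i][y] == "B":
--                         break
--                 # north
--                 for i in range(x, -1, -1):
--                     if board[i][y] == "p":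
--                         captures += 1
--                         break
--                     elif board[i][y] == "B":
--                         break
--                 # east
--                 for i in range(y, len(board[x])):
--                     if board[x][i] == "p":
--                         captures += 1
--                         break
--                     elif board[x][i] == "B":
--                         break
--                 # west
--                 for i in range(y, -1, -1):
--                     if board[x][i] == "p":
--                         captures += 1
--                         break
--                     elif board[x][i] == "B":
--                         break
--
--                 return captures
--
--     return 0
-- ===== SOURCE B (Python) =====
-- from typing import List
--
-- def numRookCaptures(board: List[List[str]]) -> int:
--     pos = next(((x, y) for x, row in enumerate(board)
--                 for y, c in enumerate(row) if c == "R"), None)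
--     if pos is None:
--         return 0
--     x, y = pos
--     col = [board[i][y] for i in range(len(board))]
--     total = 0
--     for line, r in ((board[x], y), (col, x)):
--         comp = [(i, c) for i, c in enumerate(line) if c in ("p", "B")]
--         before = [c for i, c in comp if i < r]
--         after = [c for i, c in comp if i > r]
--         if before and before[-1] == "p":
--             total += 1
--         if after and after[0] == "p":
--             total += 1
--     return total
-- ===== Notes on version B (the rewrite author's own statement) =====
-- stated objective: alternative
-- what changed: B finds the rook once via enumerate, materialises its row and column, and reads each capture off the nearest 'p'/'B' neighbours of the rook in the compressed (index,piece) lists, instead of A's quadruply-nested directional rescans with break logic.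
-- outside the precondition, e.g. on numRookCaptures([['R'], ['B'], []]): A returns 0, B raises IndexError
import Mathlib
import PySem

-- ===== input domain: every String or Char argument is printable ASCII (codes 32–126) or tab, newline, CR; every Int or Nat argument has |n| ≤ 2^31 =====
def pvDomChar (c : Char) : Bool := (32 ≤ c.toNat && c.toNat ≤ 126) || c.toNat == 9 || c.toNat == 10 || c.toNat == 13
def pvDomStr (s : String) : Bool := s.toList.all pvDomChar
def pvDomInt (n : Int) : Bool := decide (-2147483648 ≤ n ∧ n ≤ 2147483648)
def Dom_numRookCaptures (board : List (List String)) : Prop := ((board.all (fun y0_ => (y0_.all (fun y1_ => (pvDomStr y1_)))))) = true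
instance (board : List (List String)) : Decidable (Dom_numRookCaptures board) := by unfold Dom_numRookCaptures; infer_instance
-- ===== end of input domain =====

-- B locates the rook once and inspects only the nearest "p"/"B" neighbours of the rook in the
-- compressed row and column index lists, instead of A's four directional rescans; objective: alternative.

-- board[i][j] with the Python raise replaced by a default (Pre_ keeps all used indexes in range)
def pvCellGet (board : List (List String)) (i j : Int) : String :=
  PySem.List.pyGetD (PySem.List.pyGetD board i []) j ""

-- 'c in ("p", "B")'
def isPB (c : String) : Bool := c == "p" || c == "B"

-- ===== PORT A =====
-- one directional 'for i in …: if cell == "p": captures += 1; break; elif cell == "B": break'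
def pvScanDir (get : Int → String) : List Int → Int
  | [] => 0
  | i :: rest => if get i = "p" then 1 else if get i = "B" then 0 else pvScanDir get rest

-- inner 'for y in range(len(board[x])): if board[x][y] == "R"'
def pvFindY : List String → Nat → Option Nat
  | [], _ => none
  | c :: rest, y => if c = "R" then some y else pvFindY rest (y + 1)

-- outer 'for x in range(len(board))'
def pvFindRows : List (List String) → Nat → Option (Nat × Nat)
  | [], _ => none
  | row :: rest, x =>
    match pvFindY row 0 with
    | some y => some (x, y)
    | none => pvFindRows rest (x + 1)

def numRookCaptures (board : List (List String)) : Int :=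
  match pvFindRows board 0 with
  | none => 0
  | some (x, y) =>
      pvScanDir (fun i => pvCellGet board i y) (PySem.List.pyRange x board.length 1)
      + pvScanDir (fun i => pvCellGet board i y) (PySem.List.pyRange x (-1) (-1))
      + pvScanDir (fun i => pvCellGet board x i)
          (PySem.List.pyRange y (PySem.List.pyGetD board (x : Int) []).length 1)
      + pvScanDir (fun i => pvCellGet board x i) (PySem.List.pyRange y (-1) (-1))

-- ===== PORT B =====
-- enumerate(xs) starting at index k
def altEnum {α : Type} : List α → Nat → List (Nat × α)
  | [], _ => []
  | c :: rest, i => (i, c) :: altEnum rest (i + 1)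

-- next(((x, y) for x, row in enumerate(board) for y, c in enumerate(row) if c == "R"), None)
def altFind (board : List (List String)) : Option (Nat × Nat) :=
  ((altEnum board 0).flatMap (fun xr =>
    (altEnum xr.2 0).filterMap (fun yc =>
      if yc.2 = "R" then some (xr.1, yc.1) else none))).head?

-- one iteration of 'for line, r in ((board[x], y), (col, x))'
def altLine (line : List String) (r : Nat) : Int :=
  let comp := (altEnum line 0).filter (fun ic => isPB ic.2)
  let before := (comp.filter (fun ic => ic.1 < r)).map Prod.snd
  let after := (comp.filter (fun ic => r < ic.1)).map Prod.snd
  (if before.getLast? = some "p" then 1 else 0) +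
  (if after.head? = some "p" then 1 else 0)

def numRookCaptures_alt (board : List (List String)) : Int :=
  match altFind board with
  | none => 0
  | some (x, y) =>
      altLine (PySem.List.pyGetD board (x : Int) []) y +
      altLine ((PySem.List.pyRange 0 board.length 1).map (fun i => pvCellGet board i y)) x

-- ===== PRECONDITION & SPEC =====
-- column index of the first rook in row-major order, if any (library functions; not either port)
def preRook (board : List (List String)) : Option Nat :=
  (board.findIdx? (fun row => row.contains "R")).map (fun x => (board.getD x []).idxOf "R")

-- Pre_ excludes ragged boards on which some row is shorter than (or as short as) the rook's
-- column index: there the Python column accesses board[i][y] can raise IndexError (always in B,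
-- in A unless a blocker stops the scan first, so A sometimes still returns there — see the cite
-- in claim.json).
def Pre_numRookCaptures (board : List (List String)) : Prop :=
  ∀ y ∈ (preRook board).toList, ∀ row ∈ board, y < row.length
instance (board : List (List String)) : Decidable (Pre_numRookCaptures board) := by
  unfold Pre_numRookCaptures; infer_instance

def pvWitness_numRookCaptures : List (List String) :=
  [[".", "p", "."], ["p", "R", "B"], [".", "p", "."]]

def Spec_numRookCaptures (board : List (List String)) (out : Int) : Prop := out = numRookCaptures_alt board
instance (board : List (List String)) (out : Int) : Decidable (Spec_numRookCaptures board out) := by unfold Spec_numRookCaptures; infer_instance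

-- ===== CLAIM (what is proved, stated in full; the proofs are below) =====
def Claim_equal_numRookCaptures : Prop := ∀ (board : List (List String)), Dom_numRookCaptures board → Pre_numRookCaptures board → Spec_numRookCaptures board (numRookCaptures board)

-- ===== LEMMAS AND PROOFS =====

-- the value of a directional scan, read off the scanned cells that are "p" or "B"
def pbFirst (s : List String) : Int := if s.head? = some "p" then 1 else 0

theorem scanDir_eq_pbFirst (g : Int → String) (l : List Int) :
    pvScanDir g l = pbFirst ((l.filter (fun i => isPB (g i))).map g) := by
  induction l with
  | nil => rfl
  | cons i rest ih =>
    by_cases h1 : g i = "p"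
    · simp [pvScanDir, pbFirst, isPB, h1]
    · by_cases h2 : g i = "B"
      · simp [pvScanDir, pbFirst, isPB, h2]
      · simp [pvScanDir, pbFirst, isPB, h1, h2, ih]

theorem pyRange_desc (a : Nat) :
    PySem.List.pyRange (a : Int) (-1) (-1) = (PySem.List.pyRange 0 ((a : Int) + 1) 1).reverse := by
  have h1 : PySem.List.pyRange (a : Int) (-1) (-1)
      = (List.range (a+1)).map (fun k : Nat => (a : Int) - (k : Int)) := by
    simp only [PySem.List.pyRange]
    rw [if_neg (by omega), if_neg (by omega), if_pos (show (-1 : Int) < (a : Int) by omega)]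
    have h0 : (((a : Int) - -1 + -(-1) - 1) / -(-1)).toNat = a + 1 := by
      norm_num
    rw [h0]
    apply List.map_congr_left
    intro k _; ring
  have h2 : PySem.List.pyRange 0 ((a : Int) + 1) 1
      = (List.range (a+1)).map (fun k : Nat => (k : Int)) := by
    rw [PySem.List.pyRange_one]
    have h3 : ((a : Int) + 1 - 0).toNat = a + 1 := by omega
    rw [h3]
    apply List.map_congr_left
    intro k _; ring
  rw [h1, h2]
  apply List.ext_getElem
  · simp
  · intro i hi1 hi2
    simp at hi1
    simp [List.getElem_reverse, hi1]

theorem range_filter_map (line : List String) (a d : Nat) (h : a + d ≤ line.length) :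
    (((List.range d).map (fun k : Nat => (a : Int) + (k : Int))).filter
        (fun i => isPB (PySem.List.pyGetD line i ""))).map
      (fun i => PySem.List.pyGetD line i "")
    = ((line.take (a + d)).drop a).filter isPB := by
  induction d generalizing a with
  | zero =>
    have h0 : (line.take a).drop a = [] := by
      apply List.drop_eq_nil_of_le; simp
    simp [h0]
  | succ d ih =>
    rw [List.range_succ_eq_map]
    have ha : a < line.length := by omega
    have hget : PySem.List.pyGetD line ((a : Int) + ((0 : Nat) : Int)) "" = line.getD a "" := by
      have hcast : ((a : Int) + ((0 : Nat) : Int)) = ((a : Nat) : Int) := by push_cast; ring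
      rw [hcast, PySem.List.pyGetD_natCast]
    have hc : (List.map (fun k : Nat => (a : Int) + (k : Int)) (List.map Nat.succ (List.range d)))
        = List.map (fun k : Nat => (((a+1 : Nat)) : Int) + (k : Int)) (List.range d) := by
      rw [List.map_map]; apply List.map_congr_left; intro k _
      simp; omega
    have hdrop : (line.take (a + (d+1))).drop a
        = line.getD a "" :: (line.take ((a+1) + d)).drop (a+1) := by
      have h1 : a < (line.take (a + (d+1))).length := by simp; omega
      rw [List.drop_eq_getElem_cons h1]
      congr 1
      · rw [List.getElem_take, List.getD_eq_getElem line "" ha]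
      · have h2 : a + (d+1) = (a+1) + d := by omega
        rw [h2]
    rw [List.map_cons, hc, hdrop, List.filter_cons, List.filter_cons, hget]
    by_cases hPB : isPB (line.getD a "")
    · simp only [hPB, if_pos, List.map_cons, hget]
      rw [ih (a+1) (by omega)]
    · simp only [hPB, Bool.false_eq_true, if_false]
      rw [ih (a+1) (by omega)]

-- A's forward scan from the rook cell, as the head of the compressed suffix
theorem scan_fwd (line : List String) (r : Nat) (hr : r < line.length)
    (hR : isPB (line.getD r "") = false) :
    pvScanDir (fun i => PySem.List.pyGetD line i "") (PySem.List.pyRange r line.length 1)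
    = pbFirst ((line.drop (r+1)).filter isPB) := by
  rw [scanDir_eq_pbFirst, PySem.List.pyRange_one]
  have h1 : ((line.length : Int) - r).toNat = line.length - r := by omega
  rw [h1]
  have h2 := range_filter_map line r (line.length - r) (by omega)
  have h3 : r + (line.length - r) = line.length := by omega
  rw [h3] at h2
  rw [h2, List.take_length, List.drop_eq_getElem_cons hr, List.filter_cons]
  rw [List.getD_eq_getElem line "" hr] at hR
  simp [hR]

-- A's backward scan from the rook cell, as the last of the compressed prefix
theorem scan_bwd (line : List String) (r : Nat) (hr : r < line.length)
    (hR : isPB (line.getD r "") = false) :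
    pvScanDir (fun i => PySem.List.pyGetD line i "") (PySem.List.pyRange r (-1) (-1))
    = pbFirst (((line.take r).filter isPB).reverse) := by
  rw [scanDir_eq_pbFirst, pyRange_desc, List.filter_reverse, List.map_reverse]
  have h2 := range_filter_map line 0 (r + 1) (by omega)
  have hc : (List.map (fun k : Nat => ((0 : Nat) : Int) + (k : Int)) (List.range (r+1)))
      = PySem.List.pyRange 0 ((r : Int) + 1) 1 := by
    rw [PySem.List.pyRange_one]
    have h3 : ((r : Int) + 1 - 0).toNat = r + 1 := by omega
    rw [h3]
    apply List.map_congr_left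
    intro k _; simp
  rw [hc] at h2
  rw [h2]
  simp only [Nat.zero_add, List.drop_zero]
  rw [List.take_add_one, List.getElem?_eq_getElem hr, List.filter_append]
  rw [List.getD_eq_getElem line "" hr] at hR
  simp [hR]

-- B's per-line helpers
theorem altEnum_append {α : Type} (xs ys : List α) (k : Nat) :
    altEnum (xs ++ ys) k = altEnum xs k ++ altEnum ys (k + xs.length) := by
  induction xs generalizing k with
  | nil => simp [altEnum]
  | cons c rest ih =>
    have hidx : k + 1 + rest.length = k + (rest.length + 1) := by omega
    simp only [List.cons_append, altEnum, List.length_cons, ih, hidx]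

theorem mem_altEnum_bounds {α : Type} (xs : List α) (k : Nat) (ic : Nat × α)
    (h : ic ∈ altEnum xs k) : k ≤ ic.1 ∧ ic.1 < k + xs.length := by
  induction xs generalizing k with
  | nil => simp [altEnum] at h
  | cons c rest ih =>
    simp only [altEnum, List.mem_cons] at h
    rcases h with h | h
    · simp [h]
    · have := ih (k + 1) h
      simp only [List.length_cons]
      omega

theorem altEnum_filter_map_snd (xs : List String) (k : Nat) :
    (((altEnum xs k).filter (fun ic => isPB ic.2)).map Prod.snd) = xs.filter isPB := by
  induction xs generalizing k with
  | nil => rfl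
  | cons c rest ih =>
    by_cases h : isPB c
    · simp [altEnum, h, ih]
    · simp [altEnum, h, ih]

theorem altEnum_split (line : List String) (m : Nat) :
    altEnum line 0 = altEnum (line.take m) 0 ++ altEnum (line.drop m) ((line.take m).length) := by
  conv_lhs => rw [← List.take_append_drop m line]
  rw [altEnum_append]
  simp

theorem before_eq (line : List String) (r : Nat) :
    ((((altEnum line 0).filter (fun ic => isPB ic.2)).filter (fun ic => ic.1 < r)).map Prod.snd)
      = (line.take r).filter isPB := by
  rw [altEnum_split line r, List.filter_append, List.filter_append, List.map_append]
  have hfirst : ((altEnum (line.take r) 0).filter (fun ic => isPB ic.2)).filter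
      (fun ic => ic.1 < r) = (altEnum (line.take r) 0).filter (fun ic => isPB ic.2) := by
    apply List.filter_eq_self.mpr
    intro ic hic
    have hb := mem_altEnum_bounds _ _ _ (List.mem_of_mem_filter hic)
    have hl : (line.take r).length ≤ r := by simp
    simp only [decide_eq_true_eq]
    omega
  have hsecond : ((altEnum (line.drop r) ((line.take r).length)).filter
      (fun ic => isPB ic.2)).filter (fun ic => ic.1 < r) = [] := by
    rw [List.filter_eq_nil_iff]
    intro ic hic
    have hb := mem_altEnum_bounds _ _ _ (List.mem_of_mem_filter hic)
    simp only [List.length_take, List.length_drop] at hb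
    simp only [decide_eq_true_eq, not_lt]
    omega
  rw [hfirst, hsecond, altEnum_filter_map_snd]
  simp

theorem after_eq (line : List String) (r : Nat) :
    ((((altEnum line 0).filter (fun ic => isPB ic.2)).filter (fun ic => r < ic.1)).map Prod.snd)
      = (line.drop (r+1)).filter isPB := by
  rw [altEnum_split line (r+1), List.filter_append, List.filter_append, List.map_append]
  have hfirst : ((altEnum (line.take (r+1)) 0).filter (fun ic => isPB ic.2)).filter
      (fun ic => r < ic.1) = [] := by
    rw [List.filter_eq_nil_iff]
    intro ic hic
    have hb := mem_altEnum_bounds _ _ _ (List.mem_of_mem_filter hic)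
    have hl : (line.take (r+1)).length ≤ r + 1 := by simp
    simp only [decide_eq_true_eq, not_lt]
    omega
  have hsecond : ((altEnum (line.drop (r+1)) ((line.take (r+1)).length)).filter
      (fun ic => isPB ic.2)).filter (fun ic => r < ic.1)
      = (altEnum (line.drop (r+1)) ((line.take (r+1)).length)).filter (fun ic => isPB ic.2) := by
    apply List.filter_eq_self.mpr
    intro ic hic
    have hb := mem_altEnum_bounds _ _ _ (List.mem_of_mem_filter hic)
    simp only [List.length_take, List.length_drop] at hb
    simp only [decide_eq_true_eq]
    omega
  rw [hfirst, hsecond, altEnum_filter_map_snd]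
  simp

theorem altLine_eq (line : List String) (r : Nat) :
    altLine line r = pbFirst (((line.take r).filter isPB).reverse)
      + pbFirst ((line.drop (r+1)).filter isPB) := by
  simp only [altLine, pbFirst]
  rw [before_eq, after_eq, List.getLast?_eq_head?_reverse]

-- the two rook finders agree
theorem rowFind_eq (row : List String) (j x : Nat) :
    ((altEnum row j).filterMap (fun yc =>
      if yc.2 = "R" then some (x, yc.1) else none)).head?
    = (pvFindY row j).map (fun y => (x, y)) := by
  induction row generalizing j with
  | nil => rfl
  | cons c rest ih =>
    by_cases hc : c = "R"
    · simp [altEnum, pvFindY, hc]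
    · simp [altEnum, pvFindY, hc, ih]

theorem altFind_eq_aux (board : List (List String)) (k : Nat) :
    ((altEnum board k).flatMap (fun xr =>
      (altEnum xr.2 0).filterMap (fun yc =>
        if yc.2 = "R" then some (xr.1, yc.1) else none))).head?
    = pvFindRows board k := by
  induction board generalizing k with
  | nil => rfl
  | cons row rest ih =>
    rw [show altEnum (row :: rest) k = (k, row) :: altEnum rest (k+1) from rfl]
    rw [List.flatMap_cons, List.head?_append, rowFind_eq row 0 k]
    cases hY : pvFindY row 0 with
    | some y => simp [pvFindRows, hY]
    | none => simp [pvFindRows, hY, ih]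

theorem altFind_eq (board : List (List String)) : altFind board = pvFindRows board 0 :=
  altFind_eq_aux board 0

-- facts extracted from a successful find
theorem pvFindY_facts (row : List String) (j y : Nat) (h : pvFindY row j = some y) :
    j ≤ y ∧ row[y - j]? = some "R" := by
  induction row generalizing j with
  | nil => simp [pvFindY] at h
  | cons c rest ih =>
    by_cases hc : c = "R"
    · simp [pvFindY, hc] at h
      subst h; simp [hc]
    · simp [pvFindY, hc] at h
      obtain ⟨h1, h2⟩ := ih (j+1) h
      refine ⟨by omega, ?_⟩
      have h3 : y - j = (y - (j+1)) + 1 := by omega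
      rw [h3]; simpa using h2

theorem pvFindRows_facts (board : List (List String)) (k x y : Nat)
    (h : pvFindRows board k = some (x, y)) :
    k ≤ x ∧ ∃ row, board[x - k]? = some row ∧ pvFindY row 0 = some y := by
  induction board generalizing k with
  | nil => simp [pvFindRows] at h
  | cons row rest ih =>
    cases hY : pvFindY row 0 with
    | some y' =>
      simp [pvFindRows, hY] at h
      obtain ⟨hx, hy⟩ := h
      subst hx; subst hy
      exact ⟨le_refl _, row, by simp, hY⟩
    | none =>
      simp [pvFindRows, hY] at h
      obtain ⟨h1, row', h2, h3⟩ := ih (k+1) h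
      refine ⟨by omega, row', ?_, h3⟩
      have h4 : x - k = (x - (k+1)) + 1 := by omega
      rw [h4]; simpa using h2

-- ===== VERDICT (by name: the statement is the Claim_ definition above) =====
theorem numRookCaptures_spec : Claim_equal_numRookCaptures := by
  intro board _ hPre
  unfold Spec_numRookCaptures
  cases h : pvFindRows board 0 with
  | none => simp [numRookCaptures, numRookCaptures_alt, altFind_eq, h]
  | some xy =>
    obtain ⟨x, y⟩ := xy
    simp only [numRookCaptures, numRookCaptures_alt, altFind_eq, h]
    obtain ⟨-, row, hrow?, hY⟩ := pvFindRows_facts board 0 x y h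
    simp only [Nat.sub_zero] at hrow?
    obtain ⟨hx, hrowx⟩ := List.getElem?_eq_some_iff.mp hrow?
    obtain ⟨-, hRy?⟩ := pvFindY_facts row 0 y hY
    simp only [Nat.sub_zero] at hRy?
    obtain ⟨hy, hRy⟩ := List.getElem?_eq_some_iff.mp hRy?
    -- board[x] as a list
    have hrowD : PySem.List.pyGetD board (x : Int) ([] : List String) = row := by
      rw [PySem.List.pyGetD_natCast, List.getD_eq_getElem board [] hx, hrowx]
    -- the column as a plain list
    have hcol : ((PySem.List.pyRange 0 (board.length : Int) 1).map (fun i => pvCellGet board i y))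
        = board.map (fun r => PySem.List.pyGetD r (y : Int) "") := by
      rw [PySem.List.pyRange_one]
      have hl : ((board.length : Int) - 0).toNat = board.length := by omega
      rw [hl, List.map_map]
      apply List.ext_getElem
      · simp
      · intro i h1 h2
        simp only [List.length_map, List.length_range] at h1
        simp only [List.getElem_map, List.getElem_range, Function.comp_apply]
        unfold pvCellGet
        rw [zero_add]
        simp [List.getElem?_eq_getElem h1]
    set colL : List String := board.map (fun r => PySem.List.pyGetD r (y : Int) "") with hcolL
    -- the two scanned access functions are literally pyGetD into row / colL
    have hgrow : (fun i => pvCellGet board (x : Int) i) = (fun i => PySem.List.pyGetD row i "") := by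
      funext i; unfold pvCellGet; rw [hrowD]
    have hnil : PySem.List.pyGetD ([] : List String) (y : Int) "" = "" := by
      simp [PySem.List.pyGetD, PySem.List.pyGet?]
    have hgcol : (fun i => pvCellGet board i (y : Int)) = (fun i => PySem.List.pyGetD colL i "") := by
      funext i
      have hm := PySem.List.pyGetD_map (fun r => PySem.List.pyGetD r (y : Int) "")
        board i ([] : List String)
      rw [hnil] at hm
      unfold pvCellGet
      rw [hcolL]
      exact hm.symm
    have hcollen : colL.length = board.length := by simp [hcolL]
    have hcolx : colL.getD x "" = "R" := by
      rw [List.getD_eq_getElem colL "" (by rw [hcollen]; exact hx)]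
      simp only [hcolL, List.getElem_map]
      rw [hrowx, PySem.List.pyGetD_natCast, List.getD_eq_getElem row "" hy, hRy]
    have hrowy : row.getD y "" = "R" := by
      rw [List.getD_eq_getElem row "" hy, hRy]
    have hPBR_row : isPB (row.getD y "") = false := by rw [hrowy]; rfl
    have hPBR_col : isPB (colL.getD x "") = false := by rw [hcolx]; rfl
    -- rewrite the four scans of A and the two lines of B
    rw [hrowD, hcol, hgrow, hgcol]
    have hxlen : x < colL.length := by rw [hcollen]; exact hx
    rw [show (board.length : Int) = (colL.length : Int) by rw [hcollen]]
    rw [scan_fwd colL x hxlen hPBR_col, scan_bwd colL x hxlen hPBR_col]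
    rw [scan_fwd row y hy hPBR_row, scan_bwd row y hy hPBR_row]
    rw [altLine_eq, altLine_eq]
    omega
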